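-- pv_equiv track=rewrite | github.com/SophieHYe/PreciseBugs | CVEs/CVE-2018-25056/buggy/metadata.py | display_sort
-- ===== SOURCE A (Python) =====
-- def display_sort(metadata):
--     """Return an ordered list of key-value pairs, of a given metadata dict"""
--     key_order = (
--         'Name',
--         'Version',
--         'Summary',
--         'License',
--         'Home-page',
--         'Project-URL',
--         'Download-URL',
--         'Description',
--         'Description-Content-Type',
--         'Author',
--         'Author-email',
--         'Maintainer',
--         'Maintainer-email',
--         'Keywords',
--         'Classifier',
--         'Requires-Python',
--         'Requires-External',
--         'Requires-Dist',
--         'Requires',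
--         'Provides-Dist',
--         'Provides',
--         'Provides-Extra',
--         'Obsoletes-Dist',
--         'Obsoletes',
--         'Platform',
--         'Supported-Platform',
--         'Metadata-Version',
--     )
--     indices = dict((key, i) for i, key in enumerate(key_order))
--
--     if isinstance(metadata, dict):
--         metadata = metadata.items()
--
--     return sorted(metadata, key=lambda row: (indices.get(row[0], 100), row))
-- ===== SOURCE B (Python) =====
-- def display_sort(metadata):
--     """Return an ordered list of key-value pairs, of a given metadata dict"""
--     key_order = (
--         'Name',
--         'Version',
--         'Summary',
--         'License',
--         'Home-page',
--         'Project-URL',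
--         'Download-URL',
--         'Description',
--         'Description-Content-Type',
--         'Author',
--         'Author-email',
--         'Maintainer',
--         'Maintainer-email',
--         'Keywords',
--         'Classifier',
--         'Requires-Python',
--         'Requires-External',
--         'Requires-Dist',
--         'Requires',
--         'Provides-Dist',
--         'Provides',
--         'Provides-Extra',
--         'Obsoletes-Dist',
--         'Obsoletes',
--         'Platform',
--         'Supported-Platform',
--         'Metadata-Version',
--     )
--     known = set(key_order)
--
--     if isinstance(metadata, dict):
--         metadata = list(metadata.items())
--
--     result = []
--     for key in key_order:
--         result.extend(sorted(row for row in metadata if row[0] == key))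
--     result.extend(sorted(row for row in metadata if row[0] not in known))
--     return result
-- ===== Notes on version B (the rewrite author's own statement) =====
-- stated objective: alternative
-- what changed: Replaces A's single sorted() call with a composite (priority, row) key by a partition traversal: for each predefined key in priority order, collect and sort that key's rows by the row tuple and extend the result, then append the sorted unknown-key remainder.
import Mathlib
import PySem

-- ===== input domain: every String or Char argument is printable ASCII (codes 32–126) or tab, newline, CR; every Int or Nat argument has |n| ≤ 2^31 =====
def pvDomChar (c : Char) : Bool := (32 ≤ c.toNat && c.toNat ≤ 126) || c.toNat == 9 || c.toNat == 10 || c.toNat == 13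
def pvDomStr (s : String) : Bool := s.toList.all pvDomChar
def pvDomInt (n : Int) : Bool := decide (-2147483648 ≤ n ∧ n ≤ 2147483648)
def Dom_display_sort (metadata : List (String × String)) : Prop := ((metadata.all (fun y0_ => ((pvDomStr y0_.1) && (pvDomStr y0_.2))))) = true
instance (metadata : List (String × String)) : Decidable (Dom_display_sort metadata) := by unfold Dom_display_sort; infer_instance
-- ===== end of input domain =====

-- B replaces A's single composite-key sorted() call by a partition: one sorted bucket per
-- predefined key, concatenated in priority order, then the sorted unknown-key remainder (objective: alternative).
-- Both ports take a List (String × String); Python's `isinstance(metadata, dict)` branch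
-- cannot fire on a list argument, so it is a no-op in both ports and omitted.

-- ===== PORT A =====
-- the `key_order` tuple that both Python versions hold as a local constant
def pvKeyOrder : List String :=
  ["Name", "Version", "Summary", "License", "Home-page", "Project-URL", "Download-URL",
   "Description", "Description-Content-Type", "Author", "Author-email", "Maintainer",
   "Maintainer-email", "Keywords", "Classifier", "Requires-Python", "Requires-External",
   "Requires-Dist", "Requires", "Provides-Dist", "Provides", "Provides-Extra",
   "Obsoletes-Dist", "Obsoletes", "Platform", "Supported-Platform", "Metadata-Version"]

def display_sort (metadata : List (String × String)) : List (String × String) :=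
  -- indices = dict((key, i) for i, key in enumerate(key_order))
  let indices : PySem.Dict String Int :=
    (PySem.List.enumerate pvKeyOrder 0).foldl (fun d p => d.insert p.2 p.1) PySem.Dict.empty
  -- sorted(metadata, key=lambda row: (indices.get(row[0], 100), row)): the tuple key is
  -- sorted2 (k1 = the index, k2 = the row, itself compared lexicographically = toLex) — exact
  PySem.List.sorted2 metadata (fun row => indices.getD row.1 100) (fun row => toLex row) false

-- ===== PORT B =====
def display_sort_alt (metadata : List (String × String)) : List (String × String) :=
  let known : PySem.Set String := PySem.Set.ofList pvKeyOrder
  -- for key in key_order: result.extend(sorted(row for row in metadata if row[0] == key))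
  let result : List (String × String) := pvKeyOrder.foldl
    (fun acc key =>
      acc ++ PySem.List.sorted (metadata.filter (fun row => row.1 == key)) (fun r => toLex r) false)
    []
  -- result.extend(sorted(row for row in metadata if row[0] not in known))
  result ++ PySem.List.sorted
    (metadata.filter (fun row => !(PySem.Set.contains known row.1))) (fun r => toLex r) false

-- ===== PRECONDITION & SPEC =====
def Spec_display_sort (metadata : List (String × String)) (out : List (String × String)) : Prop := out = display_sort_alt metadata
instance (metadata : List (String × String)) (out : List (String × String)) : Decidable (Spec_display_sort metadata out) := by unfold Spec_display_sort; infer_instance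

-- ===== CLAIM (what is proved, stated in full; the proofs are below) =====
def Claim_equal_display_sort : Prop := ∀ (metadata : List (String × String)), Dom_display_sort metadata → Spec_display_sort metadata (display_sort metadata)

-- ===== LEMMAS AND PROOFS =====

-- sorted2's composite comparison is the lexicographic comparison of the paired key
theorem pv_sorted2_eq_sorted_toLex {α κ₁ κ₂ : Type} [LinearOrder κ₁] [LinearOrder κ₂]
    (xs : List α) (k1 : α → κ₁) (k2 : α → κ₂) :
    PySem.List.sorted2 xs k1 k2 false
      = PySem.List.sorted xs (fun x => toLex (k1 x, k2 x)) false := by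
  rw [PySem.List.sorted_eq_foldl_insertBy]
  show List.foldl (fun acc x => PySem.List.insertBy _ x acc) [] xs = _
  have hfun : (fun a b => decide (k1 a < k1 b) || (!decide (k1 b < k1 a) && decide (k2 a < k2 b)))
      = (fun a b => decide ((toLex (k1 a, k2 a) : Lex (κ₁ × κ₂)) < toLex (k1 b, k2 b))) := by
    funext a b
    rcases lt_trichotomy (k1 a) (k1 b) with h | h | h
    · simp [Prod.Lex.toLex_lt_toLex, h, not_lt_of_gt h]
    · simp [Prod.Lex.toLex_lt_toLex, h]
    · simp [Prod.Lex.toLex_lt_toLex, h, not_lt_of_gt h, h.ne']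
  rw [hfun]
  simp

-- the index A's dict assigns to a key string
def pvIdx (k : String) : Int :=
  (((PySem.List.enumerate pvKeyOrder 0).foldl (fun d p => d.insert p.2 p.1)
    PySem.Dict.empty : PySem.Dict String Int)).getD k 100

-- A's composite sort key
def pvAKey (r : String × String) : Lex (Int × Lex (String × String)) := toLex (pvIdx r.1, toLex r)


theorem pvIdx_of_not_mem (k : String) (h : k ∉ pvKeyOrder) : pvIdx k = 100 := by
  unfold pvIdx
  apply PySem.Dict.getD_of_not_contains
  rw [PySem.Dict.contains_eq_decide_mem_keys]
  rw [PySem.Dict.keys_foldl_insert_key (ν := Int) (PySem.List.enumerate pvKeyOrder 0)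
    (fun p => p.2) (fun _ p => p.1) PySem.Dict.empty]
  rw [show ((PySem.Dict.empty : PySem.Dict String Int).keys) = ([] : List String) from rfl]
  rw [PySem.List.map_snd_enumerate]
  rw [show PySem.Set.update ([] : List String) pvKeyOrder = PySem.Set.ofList pvKeyOrder from rfl]
  simpa [PySem.Set.mem_ofList] using h

set_option maxHeartbeats 4000000 in
set_option maxRecDepth 10000 in
theorem pvKeyOrder_pairwise : pvKeyOrder.Pairwise (fun a b => pvIdx a < pvIdx b) := by decide

set_option maxHeartbeats 4000000 in
set_option maxRecDepth 10000 in
theorem pvIdx_lt_100 (k : String) (h : k ∈ pvKeyOrder) : pvIdx k < 100 := by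
  fin_cases h <;> decide

theorem pvKeyOrder_nodup : pvKeyOrder.Nodup := by decide

theorem pvAKey_injective : Function.Injective pvAKey := by
  intro a b h
  have := congrArg (fun x => (ofLex x).2) h
  simpa [pvAKey] using this

theorem pv_le_of_idx_eq {r r' : String × String} (h1 : pvIdx r.1 = pvIdx r'.1)
    (h2 : (toLex r : Lex (String × String)) ≤ toLex r') : pvAKey r ≤ pvAKey r' :=
  Prod.Lex.toLex_le_toLex.mpr (Or.inr ⟨h1, h2⟩)

theorem pv_le_of_idx_lt {r r' : String × String} (h : pvIdx r.1 < pvIdx r'.1) :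
    pvAKey r ≤ pvAKey r' :=
  Prod.Lex.toLex_le_toLex.mpr (Or.inl h)

theorem pv_bucket_key {xs : List (String × String)} {r : String × String} {k : String}
    (hr : r ∈ PySem.List.sorted (xs.filter (fun row => row.1 == k)) (fun r => toLex r) false) :
    r.1 = k := by
  have := (PySem.List.mem_sorted (xs.filter (fun row => row.1 == k)) (fun r => toLex r) false r).mp hr
  have := (List.mem_filter.mp this).2
  simpa using this

theorem pv_rest_key {xs : List (String × String)} {r : String × String}
    (hr : r ∈ PySem.List.sorted
      (xs.filter (fun row => !(PySem.Set.contains (PySem.Set.ofList pvKeyOrder) row.1)))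
      (fun r => toLex r) false) :
    r.1 ∉ pvKeyOrder := by
  have := (PySem.List.mem_sorted _ (fun r => toLex r) false r).mp hr
  have := (List.mem_filter.mp this).2
  simpa [PySem.Set.contains_eq_listContains, List.contains_eq_mem, PySem.Set.mem_ofList] using this

-- counting: the concatenation of the per-key buckets plus the remainder is a permutation of metadata
theorem pv_count_flat (xs : List (String × String)) (a : String × String) :
    ∀ (ks : List String), ks.Nodup →
      (ks.flatMap (fun k =>
        PySem.List.sorted (xs.filter (fun row => row.1 == k)) (fun r => toLex r) false)).count a
      = if a.1 ∈ ks then xs.count a else 0 := by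
  intro ks
  induction ks with
  | nil => simp
  | cons k ks ih =>
    intro hnd
    obtain ⟨hk, hnd'⟩ := List.nodup_cons.mp hnd
    rw [List.flatMap_cons, List.count_append,
      (PySem.List.sorted_perm (xs.filter (fun row => row.1 == k)) (fun r => toLex r) false).count_eq a,
      ih hnd']
    by_cases hak : a.1 = k
    · rw [List.count_filter (by simp [hak])]
      simp [hak, hk]
    · have hnm : a ∉ xs.filter (fun row => row.1 == k) := by
        simp only [List.mem_filter]
        rintro ⟨-, hmem⟩
        exact hak (by simpa using hmem)
      rw [List.count_eq_zero.mpr hnm]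
      simp [List.mem_cons, hak]

theorem pv_alt_perm (xs : List (String × String)) : (display_sort_alt xs).Perm xs := by
  rw [List.perm_iff_count]
  intro a
  unfold display_sort_alt
  rw [PySem.List.foldl_append_eq_flatMap, List.nil_append, List.count_append,
    pv_count_flat xs a pvKeyOrder pvKeyOrder_nodup,
    (PySem.List.sorted_perm _ (fun r => toLex r) false).count_eq a]
  by_cases hm : a.1 ∈ pvKeyOrder
  · have hnm : a ∉ xs.filter
        (fun row => !(PySem.Set.contains (PySem.Set.ofList pvKeyOrder) row.1)) := by
      simp only [List.mem_filter]
      rintro ⟨-, hc⟩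
      simp [PySem.Set.contains_eq_listContains, List.contains_eq_mem,
        PySem.Set.mem_ofList, hm] at hc
    rw [List.count_eq_zero.mpr hnm]
    simp [hm]
  · rw [List.count_filter
      (by simp [PySem.Set.contains_eq_listContains, List.contains_eq_mem,
        PySem.Set.mem_ofList, hm])]
    simp [hm]

theorem pv_flat_pairwise (xs : List (String × String)) :
    ∀ (ks : List String), ks.Pairwise (fun a b => pvIdx a < pvIdx b) →
      (ks.flatMap (fun k =>
        PySem.List.sorted (xs.filter (fun row => row.1 == k)) (fun r => toLex r) false)).Pairwise
        (fun a b => pvAKey a ≤ pvAKey b) := by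
  intro ks
  induction ks with
  | nil => simp
  | cons k ks ih =>
    intro hp
    obtain ⟨hhead, htail⟩ := List.pairwise_cons.mp hp
    rw [List.flatMap_cons, List.pairwise_append]
    refine ⟨?_, ih htail, ?_⟩
    · exact (PySem.List.sorted_pairwise _ (fun r => toLex r)).imp_of_mem
        (fun ha hb hle => pv_le_of_idx_eq (by rw [pv_bucket_key ha, pv_bucket_key hb]) hle)
    · intro a ha b hb
      obtain ⟨k', hk', hb'⟩ := List.mem_flatMap.mp hb
      exact pv_le_of_idx_lt (by rw [pv_bucket_key ha, pv_bucket_key hb']; exact hhead k' hk')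

theorem pv_alt_pairwise (xs : List (String × String)) :
    (display_sort_alt xs).Pairwise (fun a b => pvAKey a ≤ pvAKey b) := by
  unfold display_sort_alt
  rw [PySem.List.foldl_append_eq_flatMap, List.nil_append, List.pairwise_append]
  refine ⟨pv_flat_pairwise xs pvKeyOrder pvKeyOrder_pairwise, ?_, ?_⟩
  · exact (PySem.List.sorted_pairwise _ (fun r => toLex r)).imp_of_mem
      (fun ha hb hle => pv_le_of_idx_eq
        (by rw [pvIdx_of_not_mem _ (pv_rest_key ha), pvIdx_of_not_mem _ (pv_rest_key hb)]) hle)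
  · intro a ha b hb
    obtain ⟨k', hk', ha'⟩ := List.mem_flatMap.mp ha
    refine pv_le_of_idx_lt ?_
    rw [pvIdx_of_not_mem _ (pv_rest_key hb), pv_bucket_key ha']
    exact pvIdx_lt_100 k' hk'

-- ===== VERDICT (by name: the statement is the Claim_ definition above) =====
theorem display_sort_spec : Claim_equal_display_sort := by
  intro metadata _
  unfold Spec_display_sort
  show PySem.List.sorted2 metadata (fun r => pvIdx r.1) (fun r => toLex r) false
    = display_sort_alt metadata
  rw [pv_sorted2_eq_sorted_toLex]
  show PySem.List.sorted metadata pvAKey false = display_sort_alt metadata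
  refine (PySem.List.eq_of_perm_of_pairwise_le_of_injective pvAKey pvAKey_injective
    ((PySem.List.sorted_perm metadata pvAKey false).trans (pv_alt_perm metadata).symm)
    (PySem.List.sorted_pairwise metadata pvAKey) (pv_alt_pairwise metadata))
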